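-- pv_equiv track=rewrite | github.com/zjcAlistar/communitySearch | multiesearch.py | check_satisfied
-- ===== SOURCE A (Python) =====
-- def check_satisfied(r_set, related_p, principles):
--     for i in range(len(related_p)):
--         if principles[i] == 1:
--             if not related_p[i] in r_set:
--                 return False
--         elif principles[i] == 0:
--             if related_p[i] in r_set:
--                 return False
--     return True
-- ===== SOURCE B (Python) =====
-- def check_satisfied(r_set, related_p, principles):
--     demands = {}
--     for i in range(len(related_p)):
--         p = principles[i]
--         if p == 0 or p == 1:
--             x = related_p[i]
--             saw1, saw0 = demands.get(x, (False, False))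
--             demands[x] = (saw1 or p == 1, saw0 or p == 0)
--     members = set(r_set)
--     for x, (saw1, saw0) in demands.items():
--         if saw1 and x not in members:
--             return False
--         if saw0 and x in members:
--             return False
--     return True
-- ===== Notes on version B (the rewrite author's own statement) =====
-- stated objective: alternative
-- what changed: Instead of A's per-index early-exit scan testing each constrained element against r_set, B builds an index (a dict grouping the demanded flags per distinct value) in one pass, materialises r_set as a set, and then performs one membership test per distinct constrained value.
-- outside the precondition, e.g. on check_satisfied(set(), [1, 2], [1]): A returns False, B raises IndexError
import Mathlib
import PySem

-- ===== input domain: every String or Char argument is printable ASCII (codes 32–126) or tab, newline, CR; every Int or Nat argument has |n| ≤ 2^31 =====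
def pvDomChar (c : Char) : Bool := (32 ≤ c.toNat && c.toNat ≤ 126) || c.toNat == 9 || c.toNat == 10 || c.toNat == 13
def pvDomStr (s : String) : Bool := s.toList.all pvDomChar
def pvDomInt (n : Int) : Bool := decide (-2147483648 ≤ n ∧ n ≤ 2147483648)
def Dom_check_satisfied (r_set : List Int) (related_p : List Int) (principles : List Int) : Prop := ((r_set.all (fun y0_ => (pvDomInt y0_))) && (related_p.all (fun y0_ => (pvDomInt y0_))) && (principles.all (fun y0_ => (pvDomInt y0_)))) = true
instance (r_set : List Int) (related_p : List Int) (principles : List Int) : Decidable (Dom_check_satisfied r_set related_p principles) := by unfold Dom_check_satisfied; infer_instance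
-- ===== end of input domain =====

-- B replaces A's per-index early-exit membership scan by a grouping pass: a dict mapping each
-- distinct constrained value to the pair of demanded flags, then one set-membership test per
-- distinct value against set(r_set).

-- ===== PORT A =====
-- A's for-loop over range(len(related_p)) with early 'return False'; indexing is exact under
-- Pre_ (all indices in range), so list.getD transcribes principles[i] / related_p[i].
def csLoop (r_set : List Int) (related_p : List Int) (principles : List Int) (i : Nat) : Bool :=
  if _h : i < related_p.length then
    if principles.getD i 0 = 1 then
      if !(r_set.contains (related_p.getD i 0)) then false
      else csLoop r_set related_p principles (i + 1)
    else if principles.getD i 0 = 0 then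
      if r_set.contains (related_p.getD i 0) then false
      else csLoop r_set related_p principles (i + 1)
    else csLoop r_set related_p principles (i + 1)
  else true
termination_by related_p.length - i

def check_satisfied (r_set : List Int) (related_p : List Int) (principles : List Int) : Bool :=
  csLoop r_set related_p principles 0

-- ===== PORT B =====
-- Source B's first loop: demands[x] = (saw1 or p==1, saw0 or p==0) for constrained indices
def csDemands (related_p : List Int) (principles : List Int) : PySem.Dict Int (Bool × Bool) :=
  (List.range related_p.length).foldl
    (fun d i =>
      let p := principles.getD i 0
      if p = 0 ∨ p = 1 then
        let x := related_p.getD i 0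
        let s := d.getD x (false, false)
        d.insert x (s.1 || decide (p = 1), s.2 || decide (p = 0))
      else d)
    PySem.Dict.empty

-- Source B's second loop over demands.items() with early 'return False'
def csCheckItems (members : PySem.Set Int) : List (Int × Bool × Bool) → Bool
  | [] => true
  | (x, s) :: rest =>
    if s.1 && !(PySem.Set.contains members x) then false
    else if s.2 && PySem.Set.contains members x then false
    else csCheckItems members rest

def check_satisfied_alt (r_set : List Int) (related_p : List Int) (principles : List Int) : Bool :=
  let demands := csDemands related_p principles
  let members : PySem.Set Int := PySem.Set.ofList r_set
  csCheckItems members demands.items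

-- ===== PRECONDITION & SPEC =====
-- Pre_ excludes the inputs where principles is shorter than related_p: there A either raises
-- IndexError or (when a violated constraint precedes the missing index) returns False via its
-- early exit, while B's full grouping pass always raises IndexError on them.
def Pre_check_satisfied (r_set : List Int) (related_p : List Int) (principles : List Int) : Prop :=
  related_p.length ≤ principles.length
instance (r_set : List Int) (related_p : List Int) (principles : List Int) : Decidable (Pre_check_satisfied r_set related_p principles) := by unfold Pre_check_satisfied; infer_instance

def pvWitness_check_satisfied : List Int × List Int × List Int := ([1, 3], [1, 2], [1, 0])

def Spec_check_satisfied (r_set : List Int) (related_p : List Int) (principles : List Int) (out : Bool) : Prop := out = check_satisfied_alt r_set related_p principles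
instance (r_set : List Int) (related_p : List Int) (principles : List Int) (out : Bool) : Decidable (Spec_check_satisfied r_set related_p principles out) := by unfold Spec_check_satisfied; infer_instance

-- ===== CLAIM (what is proved, stated in full; the proofs are below) =====
def Claim_equal_check_satisfied : Prop := ∀ (r_set : List Int) (related_p : List Int) (principles : List Int), Dom_check_satisfied r_set related_p principles → Pre_check_satisfied r_set related_p principles → Spec_check_satisfied r_set related_p principles (check_satisfied r_set related_p principles)

-- ===== LEMMAS AND PROOFS =====

-- one iteration's verdict, as A's loop decides it at index j
def csStep (r_set : List Int) (related_p : List Int) (principles : List Int) (j : Nat) : Bool :=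
  if principles.getD j 0 = 1 then r_set.contains (related_p.getD j 0)
  else if principles.getD j 0 = 0 then !(r_set.contains (related_p.getD j 0))
  else true

-- 'some index j < n demands flag f for value x'
def hasFlag (related_p : List Int) (principles : List Int) (f : Int) (x : Int) (n : Nat) : Bool :=
  (List.range n).any (fun j => decide (principles.getD j 0 = f) && decide (related_p.getD j 0 = x))

lemma contains_true_iff {x : Int} {l : List Int} : l.contains x = true ↔ x ∈ l := by simp

lemma csStep_of_one {r_set related_p principles : List Int} {j : Nat}
    (h1 : principles.getD j 0 = 1) :
    csStep r_set related_p principles j = r_set.contains (related_p.getD j 0) := by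
  unfold csStep; rw [if_pos h1]

lemma csStep_of_zero {r_set related_p principles : List Int} {j : Nat}
    (h0 : principles.getD j 0 = 0) :
    csStep r_set related_p principles j = !(r_set.contains (related_p.getD j 0)) := by
  unfold csStep
  rw [if_neg (by rw [h0]; decide), if_pos h0]

lemma csStep_of_other {r_set related_p principles : List Int} {j : Nat}
    (h1 : principles.getD j 0 ≠ 1) (h0 : principles.getD j 0 ≠ 0) :
    csStep r_set related_p principles j = true := by
  unfold csStep; rw [if_neg h1, if_neg h0]

lemma csLoop_iff (r_set related_p principles : List Int) :
    ∀ (k i : Nat), related_p.length - i = k →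
      (csLoop r_set related_p principles i = true ↔
        ∀ j, i ≤ j → j < related_p.length → csStep r_set related_p principles j = true) := by
  intro k
  induction k with
  | zero =>
      intro i hk
      rw [csLoop]
      rw [dif_neg (by omega)]
      constructor
      · intro _ j hij hjl; omega
      · intro _; rfl
  | succ k ih =>
      intro i hk
      have hlt : i < related_p.length := by omega
      have ihi := ih (i + 1) (by omega)
      have step_shift : (∀ j, i ≤ j → j < related_p.length → csStep r_set related_p principles j = true) ↔
          (csStep r_set related_p principles i = true ∧
            ∀ j, i + 1 ≤ j → j < related_p.length → csStep r_set related_p principles j = true) := by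
        constructor
        · intro h
          exact ⟨h i (Nat.le_refl i) hlt, fun j hij hjl => h j (by omega) hjl⟩
        · rintro ⟨hi, h⟩ j hij hjl
          rcases Nat.eq_or_lt_of_le hij with rfl | hlt'
          · exact hi
          · exact h j hlt' hjl
      rw [csLoop, dif_pos hlt, step_shift]
      by_cases h1 : principles.getD i 0 = 1
      · rw [if_pos h1]
        by_cases hc : r_set.contains (related_p.getD i 0) = true
        · rw [hc]
          rw [if_neg (by decide), ihi]
          constructor
          · intro h; exact ⟨by rw [csStep_of_one h1, hc], h⟩
          · intro h; exact h.2
        · rw [Bool.not_eq_true] at hc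
          rw [hc]
          rw [if_pos (by decide)]
          constructor
          · intro h; exact absurd h (by decide)
          · rintro ⟨hi, _⟩
            rw [csStep_of_one h1, hc] at hi
            exact absurd hi (by decide)
      · rw [if_neg h1]
        by_cases h0 : principles.getD i 0 = 0
        · rw [if_pos h0]
          by_cases hc : r_set.contains (related_p.getD i 0) = true
          · rw [if_pos hc]
            constructor
            · intro h; exact absurd h (by decide)
            · rintro ⟨hi, _⟩
              rw [csStep_of_zero h0, hc] at hi
              exact absurd hi (by decide)
          · rw [if_neg hc, ihi]
            rw [Bool.not_eq_true] at hc
            constructor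
            · intro h; exact ⟨by rw [csStep_of_zero h0, hc]; rfl, h⟩
            · intro h; exact h.2
        · rw [if_neg h0, ihi]
          constructor
          · intro h; exact ⟨csStep_of_other h1 h0, h⟩
          · intro h; exact h.2

-- the partial demands dict after processing indices 0..n-1
def csDemandsN (related_p : List Int) (principles : List Int) (n : Nat) : PySem.Dict Int (Bool × Bool) :=
  (List.range n).foldl
    (fun d i =>
      if principles.getD i 0 = 0 ∨ principles.getD i 0 = 1 then
        d.insert (related_p.getD i 0)
          ((d.getD (related_p.getD i 0) (false, false)).1 || decide (principles.getD i 0 = 1),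
            (d.getD (related_p.getD i 0) (false, false)).2 || decide (principles.getD i 0 = 0))
      else d)
    PySem.Dict.empty

lemma csDemands_eq (related_p principles : List Int) :
    csDemands related_p principles = csDemandsN related_p principles related_p.length := rfl

lemma hasFlag_succ (related_p principles : List Int) (f x : Int) (n : Nat) :
    hasFlag related_p principles f x (n + 1)
      = (hasFlag related_p principles f x n
          || (decide (principles.getD n 0 = f) && decide (related_p.getD n 0 = x))) := by
  unfold hasFlag
  rw [List.range_succ, List.any_append]
  simp

lemma csDemandsN_nodup (related_p principles : List Int) (n : Nat) :
    (csDemandsN related_p principles n).keys.Nodup := by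
  induction n with
  | zero => simp [csDemandsN, PySem.Dict.keys_empty]
  | succ n ih =>
      unfold csDemandsN at *
      rw [List.range_succ, List.foldl_append, List.foldl_cons, List.foldl_nil]
      by_cases hp : principles.getD n 0 = 0 ∨ principles.getD n 0 = 1
      · simp only [hp, if_true]
        exact PySem.Dict.nodup_keys_insert _ _ _ ih
      · simp only [hp, if_false]
        exact ih

lemma csDemandsN_getD (related_p principles : List Int) (n : Nat) (x : Int) :
    (csDemandsN related_p principles n).getD x (false, false)
      = (hasFlag related_p principles 1 x n, hasFlag related_p principles 0 x n) := by
  induction n with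
  | zero => simp [csDemandsN, hasFlag, PySem.Dict.getD_empty]
  | succ n ih =>
      unfold csDemandsN at *
      rw [List.range_succ, List.foldl_append, List.foldl_cons, List.foldl_nil]
      rw [hasFlag_succ, hasFlag_succ]
      by_cases hp : principles.getD n 0 = 0 ∨ principles.getD n 0 = 1
      · simp only [hp, if_true]
        rw [PySem.Dict.getD_insert]
        by_cases hx : x = related_p.getD n 0
        · subst hx
          rw [if_pos rfl, ih]
          simp
        · rw [if_neg hx, ih]
          have hx' : decide (related_p.getD n 0 = x) = false := by
            simp only [decide_eq_false_iff_not]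
            exact fun h => hx h.symm
          rw [hx']
          simp
      · simp only [hp, if_false, ih]
        have h1 : decide (principles.getD n 0 = 1) = false := by simp; tauto
        have h0 : decide (principles.getD n 0 = 0) = false := by simp; tauto
        rw [h1, h0]
        simp

lemma csDemandsN_mem_keys (related_p principles : List Int) (n : Nat) (x : Int) :
    x ∈ (csDemandsN related_p principles n).keys ↔
      ∃ j < n, (principles.getD j 0 = 0 ∨ principles.getD j 0 = 1) ∧ related_p.getD j 0 = x := by
  induction n with
  | zero =>
      simp [csDemandsN, PySem.Dict.keys_empty]
  | succ n ih =>
      unfold csDemandsN at *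
      rw [List.range_succ, List.foldl_append, List.foldl_cons, List.foldl_nil]
      by_cases hp : principles.getD n 0 = 0 ∨ principles.getD n 0 = 1
      · simp only [hp, if_true]
        rw [PySem.Dict.mem_keys_insert, ih]
        constructor
        · rintro (rfl | ⟨j, hj, hpj, hxj⟩)
          · exact ⟨n, by omega, hp, rfl⟩
          · exact ⟨j, by omega, hpj, hxj⟩
        · rintro ⟨j, hj, hpj, hxj⟩
          by_cases hjn : j = n
          · subst hjn; exact Or.inl hxj.symm
          · exact Or.inr ⟨j, by omega, hpj, hxj⟩
      · simp only [hp, if_false]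
        rw [ih]
        constructor
        · rintro ⟨j, hj, hpj, hxj⟩; exact ⟨j, by omega, hpj, hxj⟩
        · rintro ⟨j, hj, hpj, hxj⟩
          by_cases hjn : j = n
          · subst hjn; exact absurd hpj hp
          · exact ⟨j, by omega, hpj, hxj⟩

lemma hasFlag_iff (related_p principles : List Int) (f x : Int) (n : Nat) :
    hasFlag related_p principles f x n = true ↔
      ∃ j < n, principles.getD j 0 = f ∧ related_p.getD j 0 = x := by
  unfold hasFlag
  simp [List.any_eq_true]

lemma csCheckItems_iff (members : PySem.Set Int) (l : List (Int × Bool × Bool)) :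
    csCheckItems members l = true ↔
      ∀ p ∈ l, (p.2.1 = true → PySem.Set.contains members p.1 = true)
        ∧ (p.2.2 = true → PySem.Set.contains members p.1 = false) := by
  induction l with
  | nil => simp [csCheckItems]
  | cons hd tl ih =>
      obtain ⟨x, s1, s2⟩ := hd
      rw [csCheckItems]
      by_cases hm : x ∈ members
      · have hc : PySem.Set.contains members x = true := by
          rw [PySem.Set.contains_iff]; exact hm
        cases s1 <;> cases s2 <;> simp [hc, hm, ih]
      · have hc : PySem.Set.contains members x = false := by
          rw [← Bool.not_eq_true, PySem.Set.contains_iff]; exact hm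
        cases s1 <;> cases s2 <;> simp [hc, hm, ih]

lemma members_contains_iff (r_set : List Int) (x : Int) :
    PySem.Set.contains (PySem.Set.ofList r_set) x = true ↔ x ∈ r_set := by
  rw [PySem.Set.contains_iff, PySem.Set.mem_ofList]

lemma alt_iff (r_set related_p principles : List Int) :
    check_satisfied_alt r_set related_p principles = true ↔
      ∀ x ∈ (csDemandsN related_p principles related_p.length).keys,
        (hasFlag related_p principles 1 x related_p.length = true → x ∈ r_set)
          ∧ (hasFlag related_p principles 0 x related_p.length = true → x ∉ r_set) := by
  unfold check_satisfied_alt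
  rw [csDemands_eq, csCheckItems_iff]
  rw [PySem.Dict.items_eq_map_keys _ (csDemandsN_nodup related_p principles related_p.length) (false, false)]
  constructor
  · intro h x hx
    have := h (x, (csDemandsN related_p principles related_p.length).getD x (false, false))
      (List.mem_map.mpr ⟨x, hx, rfl⟩)
    rw [csDemandsN_getD] at this
    exact ⟨fun h1 => (members_contains_iff r_set x).mp (this.1 h1),
           fun h0 hmem => by
             have := this.2 h0
             rw [(members_contains_iff r_set x).mpr hmem] at this
             exact absurd this (by decide)⟩
  · intro h p hp
    obtain ⟨x, hx, rfl⟩ := List.mem_map.mp hp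
    rw [csDemandsN_getD]
    refine ⟨fun h1 => (members_contains_iff r_set x).mpr ((h x hx).1 h1), fun h0 => ?_⟩
    have := (h x hx).2 h0
    rw [← Bool.not_eq_true, members_contains_iff]
    exact this

-- ===== VERDICT (by name: the statement is the Claim_ definition above) =====
theorem check_satisfied_spec : Claim_equal_check_satisfied := by
  intro r_set related_p principles _ _
  unfold Spec_check_satisfied check_satisfied
  rw [Bool.eq_iff_iff, csLoop_iff r_set related_p principles (related_p.length - 0) 0 rfl,
    alt_iff]
  constructor
  · intro h x _
    constructor
    · intro h1
      obtain ⟨j, hj, hpj, hxj⟩ := (hasFlag_iff _ _ _ _ _).mp h1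
      have hs := h j (Nat.zero_le _) hj
      rw [csStep_of_one hpj, hxj] at hs
      exact contains_true_iff.mp hs
    · intro h0 hmem
      obtain ⟨j, hj, hpj, hxj⟩ := (hasFlag_iff _ _ _ _ _).mp h0
      have hs := h j (Nat.zero_le _) hj
      rw [csStep_of_zero hpj, hxj] at hs
      rw [contains_true_iff.mpr hmem] at hs
      exact absurd hs (by decide)
  · intro h j _ hjl
    by_cases h1 : principles.getD j 0 = 1
    · have hk : related_p.getD j 0 ∈ (csDemandsN related_p principles related_p.length).keys :=
        (csDemandsN_mem_keys _ _ _ _).mpr ⟨j, hjl, Or.inr h1, rfl⟩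
      have hf : hasFlag related_p principles 1 (related_p.getD j 0) related_p.length = true :=
        (hasFlag_iff _ _ _ _ _).mpr ⟨j, hjl, h1, rfl⟩
      rw [csStep_of_one h1]
      exact contains_true_iff.mpr ((h _ hk).1 hf)
    · by_cases h0 : principles.getD j 0 = 0
      · have hk : related_p.getD j 0 ∈ (csDemandsN related_p principles related_p.length).keys :=
          (csDemandsN_mem_keys _ _ _ _).mpr ⟨j, hjl, Or.inl h0, rfl⟩
        have hf : hasFlag related_p principles 0 (related_p.getD j 0) related_p.length = true :=
          (hasFlag_iff _ _ _ _ _).mpr ⟨j, hjl, h0, rfl⟩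
        rw [csStep_of_zero h0, Bool.not_eq_true', ← Bool.not_eq_true, contains_true_iff]
        exact (h _ hk).2 hf
      · exact csStep_of_other h1 h0
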